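-- pv_equiv track=rewrite | github.com/Shunikai972/BUT1 | SAEMATHFINAL/truc a complet.py | determine_valuations
-- ===== SOURCE A (Python) =====
-- def determine_valuations(list_var):
--     if None not in list_var:
--         return [list_var]
--     true = list_var.copy()
--     false = list_var.copy()
--     for i in range (len(list_var)):
--         if list_var[i] == None:
--             true[i] = True
--             false[i] = False
--             break
--     return determine_valuations(true) + determine_valuations(false)
-- ===== SOURCE B (Python) =====
-- def determine_valuations(list_var):
--     idxs = [i for i, v in enumerate(list_var) if v is None]
--     if not idxs:
--         return [list_var]
--     combos = [[]]
--     for _ in idxs: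
--         combos = [c + [b] for c in combos for b in (True, False)]
--     result = []
--     for combo in combos:
--         row = list_var.copy()
--         for i, b in zip(idxs, combo):
--             row[i] = b
--         result.append(row)
--     return result
-- ===== Notes on version B (the rewrite author's own statement) =====
-- stated objective: alternative
-- what changed: Replaces A's binary recursion that fills the first None and recurses on two copies with a flat enumeration: collect the None indices once, build all True/False combinations iteratively (truth-table order), and write each combination into a copy of the input.
import Mathlib
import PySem

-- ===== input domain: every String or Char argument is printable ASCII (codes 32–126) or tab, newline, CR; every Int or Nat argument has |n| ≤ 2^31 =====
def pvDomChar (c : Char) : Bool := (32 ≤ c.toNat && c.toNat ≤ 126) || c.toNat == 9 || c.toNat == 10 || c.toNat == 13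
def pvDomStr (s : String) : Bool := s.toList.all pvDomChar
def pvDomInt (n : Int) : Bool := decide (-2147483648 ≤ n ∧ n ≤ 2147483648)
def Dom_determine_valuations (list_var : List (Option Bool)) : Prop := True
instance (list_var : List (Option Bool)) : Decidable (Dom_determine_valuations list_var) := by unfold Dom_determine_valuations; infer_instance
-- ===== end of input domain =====

-- B replaces A's binary recursion on the first None with a flat enumeration:
-- collect None indices, build all True/False combinations, write each into a copy (alternative decomposition, same cost).

-- ===== PORT A =====
-- A's for-loop with break writes True/False at the FIRST None index; ported as fillFirst.
def fillFirst : List (Option Bool) → Bool → List (Option Bool)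
  | [], _ => []
  | none :: xs, b => some b :: xs
  | some c :: xs, b => some c :: fillFirst xs b

-- termination lemma for the port's recursion (cited by decreasing_by)
theorem fillFirst_count_lt (l : List (Option Bool)) (b : Bool) (h : none ∈ l) :
    (fillFirst l b).count none < l.count none := by
  induction l with
  | nil => simp at h
  | cons x xs ih =>
    cases x with
    | none => simp [fillFirst]
    | some c =>
      have hx : none ∈ xs := by simpa using h
      simpa [fillFirst, List.count_cons] using ih hx

def determine_valuations (list_var : List (Option Bool)) : List (List Bool) :=
  if h : none ∈ list_var then
    determine_valuations (fillFirst list_var true) ++ determine_valuations (fillFirst list_var false)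
  else
    [list_var.map (fun o => o.getD false)]   -- elements are all `some b` here; exact on the domain
termination_by list_var.count none
decreasing_by
  · exact fillFirst_count_lt _ _ h
  · exact fillFirst_count_lt _ _ h

-- ===== PORT B =====
-- [i for i, v in enumerate(list_var) if v is None]
def nIdxs : List (Option Bool) → Nat → List Nat
  | [], _ => []
  | x :: xs, i => if x = none then i :: nIdxs xs (i + 1) else nIdxs xs (i + 1)

-- for i, b in zip(idxs, combo): row[i] = b
def assignRow (l : List (Option Bool)) (idxs : List Nat) (c : List Bool) : List (Option Bool) :=
  (List.zip idxs c).foldl (fun row p => row.set p.1 (some p.2)) l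

def determine_valuations_alt (list_var : List (Option Bool)) : List (List Bool) :=
  let idxs := nIdxs list_var 0
  if idxs = [] then
    [list_var.map (fun o => o.getD false)]
  else
    let combos := idxs.foldl (fun cs _ => cs.flatMap (fun c => [c ++ [true], c ++ [false]])) [[]]
    combos.map (fun c => (assignRow list_var idxs c).map (fun o => o.getD false))

-- ===== PRECONDITION & SPEC =====
def Spec_determine_valuations (list_var : List (Option Bool)) (out : List (List Bool)) : Prop := out = determine_valuations_alt list_var
instance (list_var : List (Option Bool)) (out : List (List Bool)) : Decidable (Spec_determine_valuations list_var out) := by unfold Spec_determine_valuations; infer_instance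

-- ===== CLAIM (what is proved, stated in full; the proofs are below) =====
def Claim_equal_determine_valuations : Prop := ∀ (list_var : List (Option Bool)), Dom_determine_valuations list_var → Spec_determine_valuations list_var (determine_valuations list_var)

-- ===== LEMMAS AND PROOFS =====

-- all boolean lists of length k, lexicographic with true first
def lexT : Nat → List (List Bool)
  | 0 => [[]]
  | k + 1 => (lexT k).map (true :: ·) ++ (lexT k).map (false :: ·)

theorem lexT_ext (k : Nat) :
    (lexT k).flatMap (fun c => [c ++ [true], c ++ [false]]) = lexT (k + 1) := by
  induction k with
  | zero => rfl
  | succ k ih =>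
    simp only [lexT, List.flatMap_append, List.flatMap_map]
    rw [show (fun c => [(true :: c) ++ [true], (true :: c) ++ [false]])
          = (fun c => ([c ++ [true], c ++ [false]]).map (true :: ·)) from rfl]
    rw [show (fun c => [(false :: c) ++ [true], (false :: c) ++ [false]])
          = (fun c => ([c ++ [true], c ++ [false]]).map (false :: ·)) from rfl]
    rw [← List.map_flatMap, ← List.map_flatMap, ih]
    simp [lexT, List.map_append]

theorem combos_eq_aux (xs : List Nat) :
    ∀ k, xs.foldl (fun cs _ => cs.flatMap (fun c => [c ++ [true], c ++ [false]])) (lexT k)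
      = lexT (k + xs.length) := by
  induction xs with
  | nil => intro k; simp
  | cons x xs ih =>
    intro k
    simp only [List.foldl_cons, lexT_ext k, ih (k + 1), List.length_cons]
    ring_nf

theorem combos_eq (xs : List Nat) :
    xs.foldl (fun cs _ => cs.flatMap (fun c => [c ++ [true], c ++ [false]])) [[]]
      = lexT xs.length := by
  have := combos_eq_aux xs 0
  simpa [lexT] using this

theorem nIdxs_succ (l : List (Option Bool)) : ∀ s, nIdxs l (s + 1) = (nIdxs l s).map (· + 1) := by
  induction l with
  | nil => intro s; rfl
  | cons x xs ih =>
    intro s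
    cases x with
    | none => simp [nIdxs, ih (s + 1)]
    | some c => simp [nIdxs, ih (s + 1)]

theorem mem_none_iff (l : List (Option Bool)) : none ∈ l ↔ nIdxs l 0 ≠ [] := by
  induction l with
  | nil => simp [nIdxs]
  | cons x xs ih =>
    cases x with
    | none => simp [nIdxs]
    | some c => simp [nIdxs, nIdxs_succ, ih]

theorem fill_set (l : List (Option Bool)) (b : Bool) :
    ∀ i rest, nIdxs l 0 = i :: rest →
      fillFirst l b = l.set i (some b) ∧ nIdxs (l.set i (some b)) 0 = rest := by
  induction l with
  | nil => intro i rest h; simp [nIdxs] at h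
  | cons x xs ih =>
    intro i rest h
    cases x with
    | none =>
      simp [nIdxs, nIdxs_succ] at h
      obtain ⟨hi, hrest⟩ := h
      subst hi
      constructor
      · rfl
      · simp [nIdxs, nIdxs_succ, hrest]
    | some c =>
      simp only [nIdxs, reduceCtorEq, if_false, nIdxs_succ] at h
      cases hxs : nIdxs xs 0 with
      | nil => rw [hxs] at h; simp at h
      | cons i' rest' =>
        rw [hxs] at h
        simp at h
        obtain ⟨hi, hrest⟩ := h
        obtain ⟨h1, h2⟩ := ih i' rest' hxs
        subst hi
        constructor
        · simp [fillFirst, h1]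
        · simp [nIdxs, nIdxs_succ, h2, ← hrest]

-- closed form of B's port
theorem alt_form (l : List (Option Bool)) :
    determine_valuations_alt l
      = (lexT (nIdxs l 0).length).map
          (fun c => (assignRow l (nIdxs l 0) c).map (fun o => o.getD false)) := by
  unfold determine_valuations_alt
  by_cases h : nIdxs l 0 = []
  · simp [h, lexT, assignRow]
  · simp [h, combos_eq]

theorem A_eq_form (l : List (Option Bool)) :
    determine_valuations l
      = (lexT (nIdxs l 0).length).map
          (fun c => (assignRow l (nIdxs l 0) c).map (fun o => o.getD false)) := by
  rw [determine_valuations]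
  by_cases h : none ∈ l
  · have hne := (mem_none_iff l).mp h
    cases hidx : nIdxs l 0 with
    | nil => exact absurd hidx hne
    | cons i rest =>
      obtain ⟨hT, hnT⟩ := fill_set l true i rest hidx
      obtain ⟨hF, hnF⟩ := fill_set l false i rest hidx
      rw [dif_pos h]
      rw [A_eq_form (fillFirst l true), A_eq_form (fillFirst l false)]
      rw [hT, hF, hnT, hnF]
      simp only [List.length_cons, lexT, List.map_append, List.map_map]
      rfl
  · rw [dif_neg h]
    have : nIdxs l 0 = [] := by
      by_contra hc
      exact h ((mem_none_iff l).mpr hc)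
    simp [this, lexT, assignRow]
termination_by l.count none
decreasing_by
  · exact fillFirst_count_lt _ _ h
  · exact fillFirst_count_lt _ _ h

-- ===== VERDICT (by name: the statement is the Claim_ definition above) =====
theorem determine_valuations_spec : Claim_equal_determine_valuations := by
  intro l _
  unfold Spec_determine_valuations
  rw [A_eq_form, alt_form]
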